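-- pv_equiv track=rewrite | github.com/nclJoshCowley/AOC | Q05/Q05a_solution.py | endpoints_to_coords_covered
-- ===== SOURCE A (Python) =====
-- def endpoints_to_coords_covered(start, end):
--     x1, y1 = start
--     x2, y2 = end
--
--     if x1 == x2:
--         y_range = range(min(y1, y2), max(y1, y2) + 1)
--         return [(x1, y) for y in y_range]
--     elif y1 == y2:
--         x_range = range(min(x1, x2), max(x1, x2) + 1)
--         return [(x, y1) for x in x_range]
--     else:
--         return None
-- ===== SOURCE B (Python) =====
-- def endpoints_to_coords_covered(start, end):
--     x1, y1 = start
--     x2, y2 = end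
--     if x1 != x2 and y1 != y2:
--         return None
--     # walk the segment point by point from its lexicographically smaller
--     # endpoint to the larger one, using a unit step vector
--     px, py = min(start, end)
--     qx, qy = max(start, end)
--     dx = (qx > px) - (qx < px)
--     dy = (qy > py) - (qy < py)
--     out = []
--     x, y = px, py
--     while (x, y) != (qx, qy):
--         out.append((x, y))
--         x += dx
--         y += dy
--     out.append((x, y))
--     return out
-- ===== Notes on version B (the rewrite author's own statement) =====
-- stated objective: alternative
-- what changed: B replaces A's per-axis dispatch with two range comprehensions by an explicit point-by-point walk: it orders the endpoints lexicographically, derives a unit step vector from coordinate signs, and iterates from one endpoint to the other with an accumulator.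
import Mathlib
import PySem

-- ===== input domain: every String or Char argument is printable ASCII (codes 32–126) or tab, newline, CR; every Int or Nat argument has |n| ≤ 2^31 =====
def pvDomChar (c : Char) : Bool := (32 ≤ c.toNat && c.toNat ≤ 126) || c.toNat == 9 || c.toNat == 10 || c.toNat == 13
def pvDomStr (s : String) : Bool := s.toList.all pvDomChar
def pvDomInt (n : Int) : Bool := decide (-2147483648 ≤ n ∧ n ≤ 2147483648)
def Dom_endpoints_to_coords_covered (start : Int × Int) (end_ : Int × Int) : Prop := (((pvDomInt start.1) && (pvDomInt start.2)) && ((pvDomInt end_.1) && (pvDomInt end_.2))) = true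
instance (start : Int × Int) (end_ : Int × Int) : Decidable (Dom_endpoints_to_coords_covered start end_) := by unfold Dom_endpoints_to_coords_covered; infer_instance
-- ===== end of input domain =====

-- B walks the segment point by point with a sign step vector instead of A's per-axis range comprehensions; same cost, different decomposition.

-- ===== PORT A =====
-- literal port of A: axis dispatch, a comprehension per branch
def endpoints_to_coords_covered (start : Int × Int) (end_ : Int × Int) : Option (List (Int × Int)) :=
  let x1 := start.1; let y1 := start.2
  let x2 := end_.1;  let y2 := end_.2
  if x1 = x2 then
    some ((PySem.List.pyRange (min y1 y2) ((max y1 y2) + 1) 1).map (fun y => (x1, y)))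
  else if y1 = y2 then
    some ((PySem.List.pyRange (min x1 x2) ((max x1 x2) + 1) 1).map (fun x => (x, y1)))
  else
    none

-- ===== PORT B =====
-- Python tuple comparison min/max (lexicographic)
def pvTupLe (a b : Int × Int) : Bool := a.1 < b.1 || (a.1 == b.1 && a.2 ≤ b.2)

-- the while loop of Source B; fuel only makes the loop's termination explicit
-- (it is set to the exact Manhattan distance walked)
def pvWalk (x y qx qy dx dy : Int) : Nat → List (Int × Int)
  | 0 => [(x, y)]
  | n + 1 =>
    if (x, y) = (qx, qy) then [(x, y)]
    else (x, y) :: pvWalk (x + dx) (y + dy) qx qy dx dy n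

-- port of B: order endpoints, derive the unit step, walk with an accumulator
def endpoints_to_coords_covered_alt (start : Int × Int) (end_ : Int × Int) : Option (List (Int × Int)) :=
  let x1 := start.1; let y1 := start.2
  let x2 := end_.1;  let y2 := end_.2
  if x1 ≠ x2 ∧ y1 ≠ y2 then none
  else
    let p := if pvTupLe start end_ then start else end_
    let q := if pvTupLe start end_ then end_ else start
    let dx := (if q.1 > p.1 then (1 : Int) else 0) - (if q.1 < p.1 then (1 : Int) else 0)
    let dy := (if q.2 > p.2 then (1 : Int) else 0) - (if q.2 < p.2 then (1 : Int) else 0)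
    some (pvWalk p.1 p.2 q.1 q.2 dx dy ((q.1 - p.1).natAbs + (q.2 - p.2).natAbs))

-- ===== PRECONDITION & SPEC =====
def Spec_endpoints_to_coords_covered (start : Int × Int) (end_ : Int × Int) (out : Option (List (Int × Int))) : Prop := out = endpoints_to_coords_covered_alt start end_
instance (start : Int × Int) (end_ : Int × Int) (out : Option (List (Int × Int))) : Decidable (Spec_endpoints_to_coords_covered start end_ out) := by unfold Spec_endpoints_to_coords_covered; infer_instance

-- ===== CLAIM =====
def Claim_equal_endpoints_to_coords_covered : Prop := ∀ (start : Int × Int) (end_ : Int × Int), Dom_endpoints_to_coords_covered start end_ → Spec_endpoints_to_coords_covered start end_ (endpoints_to_coords_covered start end_)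

-- ===== LEMMAS AND PROOFS =====

-- a vertical walk of n steps is the mapped ascending range
theorem pvWalk_vert (n : Nat) : ∀ (x a : Int),
    pvWalk x a x (a + n) 0 1 n = (PySem.List.pyRange a (a + n + 1) 1).map (fun y => (x, y)) := by
  induction n with
  | zero =>
    intro x a
    simp [pvWalk, PySem.List.pyRange_one_singleton]
  | succ n ih =>
    intro x a
    have hcons : PySem.List.pyRange a (a + ((n : Nat) + 1 : Nat) + 1) 1
        = a :: PySem.List.pyRange (a + 1) (a + ((n : Nat) + 1 : Nat) + 1) 1 :=
      PySem.List.pyRange_one_cons (by push_cast; omega)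
    rw [hcons]
    simp only [pvWalk]
    rw [if_neg (by simp; omega)]
    simp only [add_zero, List.map_cons]
    push_cast
    rw [show a + ((n : Int) + 1) = (a + 1) + (n : Int) by ring]
    rw [ih x (a + 1)]

-- a horizontal walk of n steps is the mapped ascending range
theorem pvWalk_horiz (n : Nat) : ∀ (a y : Int),
    pvWalk a y (a + n) y 1 0 n = (PySem.List.pyRange a (a + n + 1) 1).map (fun x => (x, y)) := by
  induction n with
  | zero =>
    intro a y
    simp [pvWalk, PySem.List.pyRange_one_singleton]
  | succ n ih =>
    intro a y
    have hcons : PySem.List.pyRange a (a + ((n : Nat) + 1 : Nat) + 1) 1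
        = a :: PySem.List.pyRange (a + 1) (a + ((n : Nat) + 1 : Nat) + 1) 1 :=
      PySem.List.pyRange_one_cons (by push_cast; omega)
    rw [hcons]
    simp only [pvWalk]
    rw [if_neg (by simp; omega)]
    simp only [add_zero, List.map_cons]
    push_cast
    rw [show a + ((n : Int) + 1) = (a + 1) + (n : Int) by ring]
    rw [ih (a + 1) y]

theorem vertAsc (x1 y1 : Int) (k : Nat) :
    endpoints_to_coords_covered (x1, y1) (x1, y1 + (k:Int)) = endpoints_to_coords_covered_alt (x1, y1) (x1, y1 + (k:Int)) := by
  unfold endpoints_to_coords_covered endpoints_to_coords_covered_alt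
  have hle : pvTupLe (x1, y1) (x1, y1 + (k : Int)) = true := by simp [pvTupLe]
  simp only [hle, if_true]
  rw [if_neg (by simp : ¬ (x1 ≠ x1 ∧ y1 ≠ y1 + (k:Int)))]
  rw [min_eq_left (by omega : y1 ≤ y1 + (k:Int)), max_eq_right (by omega : y1 ≤ y1 + (k:Int))]
  by_cases hk : 0 < k
  · rw [show ((if x1 > x1 then (1:Int) else 0) - if x1 < x1 then (1:Int) else 0) = 0 by simp]
    rw [show ((if y1 + (k:Int) > y1 then (1:Int) else 0) - if y1 + (k:Int) < y1 then (1:Int) else 0) = 1 by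
      rw [if_pos (by omega), if_neg (by omega)]; ring]
    rw [show (x1 - x1).natAbs + (y1 + (k:Int) - y1).natAbs = k by omega]
    rw [pvWalk_vert k x1 y1]
  · have : k = 0 := by omega
    subst this
    simp [pvWalk, PySem.List.pyRange_one_singleton]

theorem vertDesc (x1 y2 : Int) (k : Nat) (hk : 0 < k) :
    endpoints_to_coords_covered (x1, y2 + (k:Int)) (x1, y2) = endpoints_to_coords_covered_alt (x1, y2 + (k:Int)) (x1, y2) := by
  unfold endpoints_to_coords_covered endpoints_to_coords_covered_alt
  have hle : pvTupLe (x1, y2 + (k : Int)) (x1, y2) = false := by simp [pvTupLe]; omega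
  simp only [hle, Bool.false_eq_true, if_false]
  rw [if_pos trivial, if_neg (by simp : ¬ (x1 ≠ x1 ∧ y2 + (k:Int) ≠ y2))]
  rw [min_eq_right (by omega : y2 ≤ y2 + (k:Int)), max_eq_left (by omega : y2 ≤ y2 + (k:Int))]
  rw [show ((if x1 > x1 then (1:Int) else 0) - if x1 < x1 then (1:Int) else 0) = 0 by simp]
  rw [show ((if y2 + (k:Int) > y2 then (1:Int) else 0) - if y2 + (k:Int) < y2 then (1:Int) else 0) = 1 by
    rw [if_pos (by omega), if_neg (by omega)]; ring]
  rw [show (x1 - x1).natAbs + (y2 + (k:Int) - y2).natAbs = k by omega]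
  rw [pvWalk_vert k x1 y2]

theorem horizAsc (x1 y1 : Int) (k : Nat) (hk : 0 < k) :
    endpoints_to_coords_covered (x1, y1) (x1 + (k:Int), y1) = endpoints_to_coords_covered_alt (x1, y1) (x1 + (k:Int), y1) := by
  unfold endpoints_to_coords_covered endpoints_to_coords_covered_alt
  have hle : pvTupLe (x1, y1) (x1 + (k : Int), y1) = true := by simp [pvTupLe]; omega
  simp only [hle, if_true]
  rw [if_neg (by simp : ¬ (x1 ≠ x1 + (k:Int) ∧ y1 ≠ y1))]
  rw [min_eq_left (by omega : x1 ≤ x1 + (k:Int)), max_eq_right (by omega : x1 ≤ x1 + (k:Int))]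
  rw [show ((if x1 + (k:Int) > x1 then (1:Int) else 0) - if x1 + (k:Int) < x1 then (1:Int) else 0) = 1 by
    rw [if_pos (by omega), if_neg (by omega)]; ring]
  rw [show ((if y1 > y1 then (1:Int) else 0) - if y1 < y1 then (1:Int) else 0) = 0 by simp]
  rw [show (x1 + (k:Int) - x1).natAbs + (y1 - y1).natAbs = k by omega]
  rw [pvWalk_horiz k x1 y1, if_neg (by omega : ¬ x1 = x1 + (k:Int))]

theorem horizDesc (x2 y1 : Int) (k : Nat) (hk : 0 < k) :
    endpoints_to_coords_covered (x2 + (k:Int), y1) (x2, y1) = endpoints_to_coords_covered_alt (x2 + (k:Int), y1) (x2, y1) := by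
  unfold endpoints_to_coords_covered endpoints_to_coords_covered_alt
  have hle : pvTupLe (x2 + (k : Int), y1) (x2, y1) = false := by simp [pvTupLe]; omega
  simp only [hle, Bool.false_eq_true, if_false]
  rw [if_pos trivial, if_neg (by simp : ¬ (x2 + (k:Int) ≠ x2 ∧ y1 ≠ y1))]
  rw [min_eq_right (by omega : x2 ≤ x2 + (k:Int)), max_eq_left (by omega : x2 ≤ x2 + (k:Int))]
  rw [show ((if x2 + (k:Int) > x2 then (1:Int) else 0) - if x2 + (k:Int) < x2 then (1:Int) else 0) = 1 by
    rw [if_pos (by omega), if_neg (by omega)]; ring]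
  rw [show ((if y1 > y1 then (1:Int) else 0) - if y1 < y1 then (1:Int) else 0) = 0 by simp]
  rw [show (x2 + (k:Int) - x2).natAbs + (y1 - y1).natAbs = k by omega]
  rw [pvWalk_horiz k x2 y1, if_neg (by omega : ¬ x2 + (k:Int) = x2)]

-- ===== VERDICT =====
theorem endpoints_to_coords_covered_spec : Claim_equal_endpoints_to_coords_covered := by
  intro start end_ _
  unfold Spec_endpoints_to_coords_covered
  obtain ⟨x1, y1⟩ := start; obtain ⟨x2, y2⟩ := end_
  by_cases hx : x1 = x2
  · subst hx
    rcases lt_trichotomy y1 y2 with h | h | h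
    · obtain ⟨k, hk⟩ : ∃ k : Nat, y2 = y1 + (k : Int) := ⟨(y2 - y1).toNat, by omega⟩
      subst hk; exact vertAsc x1 y1 k
    · subst h
      have := vertAsc x1 y1 0
      simpa using this
    · obtain ⟨k, hk⟩ : ∃ k : Nat, y1 = y2 + (k : Int) := ⟨(y1 - y2).toNat, by omega⟩
      subst hk; exact vertDesc x1 y2 k (by omega)
  · by_cases hy : y1 = y2
    · subst hy
      rcases lt_or_gt_of_ne hx with h | h
      · obtain ⟨k, hk⟩ : ∃ k : Nat, x2 = x1 + (k : Int) := ⟨(x2 - x1).toNat, by omega⟩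
        subst hk; exact horizAsc x1 y1 k (by omega)
      · obtain ⟨k, hk⟩ : ∃ k : Nat, x1 = x2 + (k : Int) := ⟨(x1 - x2).toNat, by omega⟩
        subst hk; exact horizDesc x2 y1 k (by omega)
    · simp [endpoints_to_coords_covered, endpoints_to_coords_covered_alt, hx, hy]
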